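-- pv_equiv track=rewrite | github.com/JinSon12/AlgorithmsPractice | InterviewPractice_Easy/JUL_25_MinimumCostToMoveChipsToTheSamePos.py | WRONG
-- ===== SOURCE A (Python) =====
-- from typing import List
--
-- def WRONG(position: List[int]) -> int:
--     chips = {}
--
--     for i in position:
--         if i not in chips:
--             chips[i] = 1
--         else:
--             chips[i] += 1
--
--     # O(len(chips))
--     chips_items = chips.items()
--
--     # O(len(chips))
--     maxChipId = max(chips_items, key=lambda x: x[1])[0]
--
--     res = 0
--
--     # 요기가 하이라이트.
--     """
--     Logic: 2칸씩 움직이는 것은 0, 1칸은 1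
--     ex) 1, 6 일때, 가야하는 거리는 5. 2칸씩 2번, 1칸씩 한번 움직이면 된다. 총 cost 는 1
--
--     """
--     for chip_id, cnt in chips_items:
--         if chip_id != maxChipId:
--             if abs(chip_id - maxChipId) % 2 != 0:
--                 res += 1 * cnt
--
--     return res
-- ===== SOURCE B (Python) =====
-- from typing import List
--
-- def WRONG(position: List[int]) -> int:
--     counts = {}
--     even_total = 0
--     odd_total = 0
--     for p in position:
--         counts[p] = counts.get(p, 0) + 1
--         if p % 2 == 0:
--             even_total += 1
--         else:
--             odd_total += 1
--     mode = max(counts.items(), key=lambda x: x[1])[0]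
--     return odd_total if mode % 2 == 0 else even_total
-- ===== Notes on version B (the rewrite author's own statement) =====
-- stated objective: alternative
-- what changed: B folds the parity-filtering second loop over distinct positions into two aggregate even/odd chip counters accumulated during the single counting pass, then answers with one O(1) branch on the mode's parity.
import Mathlib
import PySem

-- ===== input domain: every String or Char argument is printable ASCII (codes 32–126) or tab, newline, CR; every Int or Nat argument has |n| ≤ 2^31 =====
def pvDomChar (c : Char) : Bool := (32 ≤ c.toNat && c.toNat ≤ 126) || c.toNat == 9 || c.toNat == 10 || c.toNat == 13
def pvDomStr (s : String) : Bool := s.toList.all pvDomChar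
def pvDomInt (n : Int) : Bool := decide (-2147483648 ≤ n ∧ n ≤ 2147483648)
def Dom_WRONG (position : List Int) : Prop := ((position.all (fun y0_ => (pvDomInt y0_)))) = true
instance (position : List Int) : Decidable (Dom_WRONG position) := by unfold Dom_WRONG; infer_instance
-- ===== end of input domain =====

-- B replaces A's second loop over the distinct positions by two aggregate parity
-- counters accumulated in the single counting pass, plus one O(1) branch on the
-- parity of the mode position (objective: alternative decomposition, one pass).

-- ===== PORT A =====
def WRONG (position : List Int) : Int :=
  let chips := position.foldl
    (fun (d : PySem.Dict Int Int) i =>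
      if d.contains i = false then d.insert i 1 else d.insert i (d.getD i 0 + 1))
    PySem.Dict.empty
  let chips_items := chips.items
  match PySem.List.max? chips_items (fun x => x.2) with
  | none => 0          -- Python: max() raises ValueError here; excluded by Pre_WRONG
  | some mx =>
    chips_items.foldl
      (fun res p =>
        if p.1 ≠ mx.1 then
          if PySem.Int.mod (((p.1 - mx.1).natAbs : Nat) : Int) 2 ≠ 0 then res + 1 * p.2
          else res
        else res)
      0

-- ===== PORT B =====
def WRONG_alt (position : List Int) : Int :=
  let st := position.foldl
    (fun (s : PySem.Dict Int Int × Int × Int) p =>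
      (s.1.insert p (s.1.getD p 0 + 1),
       if PySem.Int.mod p 2 = 0 then s.2.1 + 1 else s.2.1,
       if PySem.Int.mod p 2 = 0 then s.2.2 else s.2.2 + 1))
    (PySem.Dict.empty, 0, 0)
  match PySem.List.max? st.1.items (fun x => x.2) with
  | none => 0          -- Python: max() raises ValueError here; excluded by Pre_WRONG
  | some mx =>
    if PySem.Int.mod mx.1 2 = 0 then st.2.2 else st.2.1

-- ===== PRECONDITION & SPEC =====
-- Pre_ excludes only the empty list, on which Python's max() raises ValueError in both A and B.
def Pre_WRONG (position : List Int) : Prop := position ≠ []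
instance (position : List Int) : Decidable (Pre_WRONG position) := by unfold Pre_WRONG; infer_instance
def pvWitness_WRONG : List Int := [1, 2, 2]

def Spec_WRONG (position : List Int) (out : Int) : Prop := out = WRONG_alt position
instance (position : List Int) (out : Int) : Decidable (Spec_WRONG position out) := by unfold Spec_WRONG; infer_instance

-- ===== CLAIM (what is proved, stated in full; the proofs are below) =====
def Claim_equal_WRONG : Prop := ∀ (position : List Int), Dom_WRONG position → Pre_WRONG position → Spec_WRONG position (WRONG position)

-- ===== LEMMAS AND PROOFS =====

-- A's counting loop builds exactly Counter(position).
lemma aDict_eq_counter (xs : List Int) :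
    xs.foldl (fun (d : PySem.Dict Int Int) i =>
      if d.contains i = false then d.insert i 1 else d.insert i (d.getD i 0 + 1))
      PySem.Dict.empty = PySem.Dict.counter xs := by
  have h : xs.foldl (fun (d : PySem.Dict Int Int) i =>
      if d.contains i = false then d.insert i 1 else d.insert i (d.getD i 0 + 1))
      PySem.Dict.empty
      = xs.foldl (fun (d : PySem.Dict Int Int) i => d.insert i (d.getD i 0 + 1))
      PySem.Dict.empty := by
    apply PySem.List.foldl_congr_mem
    intro d i _
    by_cases hc : d.contains i = false
    · simp [hc, PySem.Dict.getD_of_not_contains d 0 hc]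
    · simp [hc]
  rw [h]
  exact PySem.Dict.foldl_insert_getD_add_one_eq_counter xs

-- B's single pass: the dict is Counter(position) and the two counters count parities.
lemma bState (xs : List Int) (d : PySem.Dict Int Int) (e o : Int) :
    xs.foldl (fun (s : PySem.Dict Int Int × Int × Int) p =>
      (s.1.insert p (s.1.getD p 0 + 1),
       if PySem.Int.mod p 2 = 0 then s.2.1 + 1 else s.2.1,
       if PySem.Int.mod p 2 = 0 then s.2.2 else s.2.2 + 1)) (d, e, o)
    = (xs.foldl (fun d p => d.insert p (d.getD p 0 + 1)) d,
       e + (xs.countP (fun p => decide (PySem.Int.mod p 2 = 0)) : Int),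
       o + (xs.countP (fun p => decide (¬ PySem.Int.mod p 2 = 0)) : Int)) := by
  induction xs generalizing d e o with
  | nil => simp
  | cons x t ih =>
    simp only [List.foldl_cons, List.countP_cons, ih]
    by_cases hx : PySem.Int.mod x 2 = 0 <;> simp [hx] <;> omega

-- A's loop body: it adds the count exactly when the key's parity differs from the mode's.
lemma body_eq (a b res cnt : Int) :
    (if a ≠ b then
       (if PySem.Int.mod (((a - b).natAbs : Nat) : Int) 2 ≠ 0 then res + 1 * cnt else res)
     else res)
    = res + (if PySem.Int.mod a 2 ≠ PySem.Int.mod b 2 then cnt else 0) := by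
  rw [PySem.Int.mod_eq_emod_of_pos (a := (((a - b).natAbs : Nat) : Int)) (by norm_num),
      PySem.Int.mod_eq_emod_of_pos (a := a) (by norm_num),
      PySem.Int.mod_eq_emod_of_pos (a := b) (by norm_num)]
  split_ifs <;> omega

-- Summing the per-key counts over the distinct keys satisfying P counts the elements satisfying P.
lemma sum_ofList_count (xs : List Int) (P : Int → Prop) [DecidablePred P] :
    ((PySem.Set.ofList xs).map (fun k => if P k then ((xs.count k : Nat) : Int) else 0)).sum
    = ((xs.countP (fun k => decide (P k)) : Nat) : Int) := by
  have hnd : (PySem.Set.ofList xs).Nodup := PySem.Set.nodup_ofList xs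
  have hfs : (PySem.Set.ofList xs).toFinset = xs.toFinset := by
    ext a; simp [PySem.Set.mem_ofList]
  rw [← List.sum_toFinset _ hnd, hfs]
  have hnat : xs.toFinset.sum (fun k => if P k then ((xs.count k : Nat) : Int) else 0)
      = ((xs.toFinset.sum (fun k => if P k then (xs.count k : Nat) else 0) : Nat) : Int) := by
    push_cast
    exact Finset.sum_congr rfl (fun k _ => by split_ifs <;> simp)
  rw [hnat]
  congr 1
  rw [← Finset.sum_filter, List.countP_eq_length_filter]
  have h1 : ((xs.filter (fun k => decide (P k)) : List Int) : Multiset Int).toFinset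
      = xs.toFinset.filter P := by
    ext a; simp
  have h2 := Multiset.toFinset_sum_count_eq
      ((xs.filter (fun k => decide (P k)) : List Int) : Multiset Int)
  rw [h1] at h2
  simp only [Multiset.coe_count, Multiset.coe_card] at h2
  rw [← h2]
  apply Finset.sum_congr rfl
  intro k hk
  simp only [Finset.mem_filter] at hk
  rw [List.count_filter]
  simp [hk.2]

-- parities are 0 or 1
lemma mod2_cases (a : Int) : PySem.Int.mod a 2 = 0 ∨ PySem.Int.mod a 2 = 1 := by
  have h1 := PySem.Int.mod_nonneg a (b := 2) (by norm_num)
  have h2 := PySem.Int.mod_lt a (b := 2) (by norm_num)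
  omega

-- ===== VERDICT (by name: the statement is the Claim_ definition above) =====
theorem WRONG_spec : Claim_equal_WRONG := by
  intro pos _ _
  unfold Spec_WRONG
  simp only [WRONG, WRONG_alt]
  rw [aDict_eq_counter, bState, PySem.Dict.foldl_insert_getD_add_one_eq_counter]
  cases hm : PySem.List.max? (PySem.Dict.counter pos).items (fun x => x.2) with
  | none => rfl
  | some mx =>
    dsimp only
    rw [PySem.Dict.items_counter]
    have hfold : ((PySem.Set.ofList pos).map (fun k => (k, ((pos.count k : Nat) : Int)))).foldl
        (fun res p =>
          if p.1 ≠ mx.1 then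
            if PySem.Int.mod (((p.1 - mx.1).natAbs : Nat) : Int) 2 ≠ 0 then res + 1 * p.2
            else res
          else res) 0
        = ((PySem.Set.ofList pos).map (fun k => (k, ((pos.count k : Nat) : Int)))).foldl
        (fun res p => res + (if PySem.Int.mod p.1 2 ≠ PySem.Int.mod mx.1 2 then p.2 else 0)) 0 :=
      PySem.List.foldl_congr_mem _ _ _ _ (by intro res p _; exact body_eq p.1 mx.1 res p.2)
    rw [hfold, PySem.List.foldl_add, List.map_map]
    simp only [Function.comp_def]
    rw [sum_ofList_count pos (fun k => PySem.Int.mod k 2 ≠ PySem.Int.mod mx.1 2), zero_add]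
    by_cases hmx : PySem.Int.mod mx.1 2 = 0
    · rw [if_pos hmx, hmx]
      norm_num
    · rw [if_neg hmx]
      have hc : (pos.countP (fun k => decide (PySem.Int.mod k 2 ≠ PySem.Int.mod mx.1 2)))
          = pos.countP (fun p => decide (PySem.Int.mod p 2 = 0)) := by
        apply List.countP_congr
        intro k _
        rcases mod2_cases mx.1 with h' | h'
        · exact absurd h' hmx
        · rcases mod2_cases k with h | h <;> simp only [h, h'] <;> decide
      rw [hc]
      omega
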